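-- pv_equiv track=rewrite | github.com/nadijfer/Morphin | reduplikasi.py | reduplikasi
-- ===== SOURCE A (Python) =====
-- def reduplikasi(kalimat):
--     kata = kalimat.split()
--     i = 0
--     fixed_list = []
--     while i < (len(kata)-1):
--         if kata[i] == kata[i+1]:
--             fixed = kata[i] + '-' + kata[i+1]
--             fixed_list.append(fixed)
--             i+=+2
--         else :
--             fixed_list.append(kata[i])
--             i+=1
--
--     fixed_kalimat = " ".join(fixed_list)
--     return fixed_kalimat
-- ===== SOURCE B (Python) =====
-- def reduplikasi(kalimat):
--     def helper(words):
--         if len(words) < 2: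
--             return []
--         if words[0] == words[1]:
--             return [words[0] + '-' + words[1]] + helper(words[2:])
--         return [words[0]] + helper(words[1:])
--     return " ".join(helper(kalimat.split()))
-- ===== Notes on version B (the rewrite author's own statement) =====
-- stated objective: alternative
-- what changed: Replaces the index-driven while loop with list mutation by a pure structural recursion over the word list that emits each joined/plain word and recurses on the tail.
import Mathlib
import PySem

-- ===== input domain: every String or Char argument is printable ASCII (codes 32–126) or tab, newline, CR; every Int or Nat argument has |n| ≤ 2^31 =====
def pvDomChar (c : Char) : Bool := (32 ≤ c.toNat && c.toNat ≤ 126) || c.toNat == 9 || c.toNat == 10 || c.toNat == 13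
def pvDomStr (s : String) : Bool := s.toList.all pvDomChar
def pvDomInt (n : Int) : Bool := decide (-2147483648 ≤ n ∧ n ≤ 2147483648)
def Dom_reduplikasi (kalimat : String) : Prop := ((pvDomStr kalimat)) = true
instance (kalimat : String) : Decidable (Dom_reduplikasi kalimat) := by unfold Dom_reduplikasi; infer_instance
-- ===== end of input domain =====

-- B replaces A's index-driven while loop over the word list by a pure structural recursion; same return value, no speed claim.
-- ===== PORT A =====
-- the 'while i < len(kata)-1' loop, index i and accumulator fixed_list carried explicitly
def reduplikasiLoop (kata : List String) (i : Nat) (acc : List String) : List String :=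
  if _h : i < kata.length - 1 then
    if kata.getD i "" == kata.getD (i+1) "" then
      reduplikasiLoop kata (i+2) (acc ++ [kata.getD i "" ++ "-" ++ kata.getD (i+1) ""])
    else
      reduplikasiLoop kata (i+1) (acc ++ [kata.getD i ""])
  else acc
termination_by kata.length - i
decreasing_by all_goals omega

def reduplikasi (kalimat : String) : String :=
  PySem.Str.join " " (reduplikasiLoop (PySem.Str.split₀ kalimat) 0 [])

-- ===== PORT B =====
-- recursive helper over the word list
def reduplikasiHelper : List String → List String
  | x :: y :: rest =>
      if x == y then (x ++ "-" ++ y) :: reduplikasiHelper rest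
      else x :: reduplikasiHelper (y :: rest)
  | _ => []

def reduplikasi_alt (kalimat : String) : String :=
  PySem.Str.join " " (reduplikasiHelper (PySem.Str.split₀ kalimat))

-- ===== PRECONDITION & SPEC =====
def Spec_reduplikasi (kalimat : String) (out : String) : Prop := out = reduplikasi_alt kalimat
instance (kalimat : String) (out : String) : Decidable (Spec_reduplikasi kalimat out) := by unfold Spec_reduplikasi; infer_instance

-- ===== CLAIM (what is proved, stated in full; the proofs are below) =====
def Claim_equal_reduplikasi : Prop := ∀ (kalimat : String), Dom_reduplikasi kalimat → Spec_reduplikasi kalimat (reduplikasi kalimat)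

-- ===== LEMMAS AND PROOFS =====

lemma reduplikasiHelper_short (l : List String) (h : l.length < 2) : reduplikasiHelper l = [] := by
  match l with
  | [] => rfl
  | [_] => rfl
  | _ :: _ :: _ => simp at h

lemma reduplikasiLoop_eq (kata : List String) (i : Nat) (acc : List String) :
    reduplikasiLoop kata i acc = acc ++ reduplikasiHelper (kata.drop i) := by
  fun_induction reduplikasiLoop kata i acc with
  | case1 i acc h heq ih =>
      have h1 : i < kata.length := by omega
      have h2 : i + 1 < kata.length := by omega
      have hd : kata.drop i = kata[i] :: kata[i+1] :: kata.drop (i+2) := by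
        rw [List.drop_eq_getElem_cons h1, List.drop_eq_getElem_cons h2]
      rw [ih, hd, reduplikasiHelper]
      simp only [List.getD_eq_getElem _ _ h1, List.getD_eq_getElem _ _ h2] at heq ⊢
      simp [heq]
  | case2 i acc h heq ih =>
      have h1 : i < kata.length := by omega
      have h2 : i + 1 < kata.length := by omega
      have hd : kata.drop i = kata[i] :: kata[i+1] :: kata.drop (i+2) := by
        rw [List.drop_eq_getElem_cons h1, List.drop_eq_getElem_cons h2]
      rw [ih, hd, reduplikasiHelper]
      simp only [List.getD_eq_getElem _ _ h1, List.getD_eq_getElem _ _ h2] at heq ⊢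
      have hd1 : kata.drop (i+1) = kata[i+1] :: kata.drop (i+2) := List.drop_eq_getElem_cons h2
      rw [hd1]
      simp [heq]
  | case3 i acc h =>
      rw [reduplikasiHelper_short _ (by simp; omega)]
      simp

-- ===== VERDICT =====
theorem reduplikasi_spec : Claim_equal_reduplikasi := by
  intro kalimat _
  unfold Spec_reduplikasi reduplikasi reduplikasi_alt
  rw [reduplikasiLoop_eq]
  simp only [List.nil_append, List.drop_zero]
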